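-- pv_equiv track=rewrite | github.com/lebinanee/logslice | logslice/buffer.py | flush_by_count
-- ===== SOURCE A (Python) =====
-- from typing import Callable, Iterable, Iterator
--
-- def flush_by_count(
--     entries: Iterable[dict],
--     size: int,
-- ) -> Iterator[list[dict]]:
--     """Yield batches of exactly *size* entries (final batch may be smaller)."""
--     if size < 1:
--         raise ValueError("size must be >= 1")
--     buf: list[dict] = []
--     for entry in entries:
--         buf.append(entry)
--         if len(buf) >= size:
--             yield buf
--             buf = []
--     if buf:
--         yield buf
-- ===== SOURCE B (Python) =====
-- from itertools import islice
-- from typing import Iterable, Iterator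
--
-- def flush_by_count(
--     entries: Iterable[dict],
--     size: int,
-- ) -> Iterator[list[dict]]:
--     """Yield batches of exactly *size* entries (final batch may be smaller)."""
--     if size < 1:
--         raise ValueError("size must be >= 1")
--     it = iter(entries)
--     while True:
--         batch = list(islice(it, size))
--         if not batch:
--             return
--         yield batch
-- ===== Notes on version B (the rewrite author's own statement) =====
-- stated objective: idiomatic
-- what changed: Replaces the element-by-element buffer accumulation (append + length check per entry) with the standard islice chunking recipe that consumes whole size-sized slices from the iterator per loop iteration.
-- outside the precondition, e.g. on flush_by_count([{'a': 'b'}], 0): A raises ValueError, B raises ValueError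
import Mathlib
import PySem

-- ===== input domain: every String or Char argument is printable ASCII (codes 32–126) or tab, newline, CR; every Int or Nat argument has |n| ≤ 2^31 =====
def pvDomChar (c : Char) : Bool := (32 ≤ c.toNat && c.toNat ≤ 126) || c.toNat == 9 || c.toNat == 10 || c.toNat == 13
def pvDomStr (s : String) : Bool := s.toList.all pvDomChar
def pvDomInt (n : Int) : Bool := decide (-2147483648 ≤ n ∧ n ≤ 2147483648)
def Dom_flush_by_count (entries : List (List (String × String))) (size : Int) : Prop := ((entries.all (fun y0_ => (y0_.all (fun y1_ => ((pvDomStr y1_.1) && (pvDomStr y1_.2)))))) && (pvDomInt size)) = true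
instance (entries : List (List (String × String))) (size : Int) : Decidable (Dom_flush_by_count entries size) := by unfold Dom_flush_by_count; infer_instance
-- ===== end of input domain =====

-- B replaces A's per-entry buffer accumulation with the idiomatic islice chunking recipe
-- (take a whole size-slice per loop step); equal return values proved for size ≥ 1 (A raises ValueError otherwise).

-- ===== PORT A =====
-- the generator's for-loop: state is (collected yields `out`, current buffer `buf`)
def flushLoopA (size : Int) :
    List (List (String × String)) → List (List (List (String × String))) →
    List (List (String × String)) → List (List (List (String × String)))
  | [], out, buf => if buf = [] then out else out ++ [buf]   -- `if buf: yield buf`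
  | e :: rest, out, buf =>
      let buf' := buf ++ [e]                                  -- buf.append(entry)
      if size ≤ (buf'.length : Int)                           -- len(buf) >= size
      then flushLoopA size rest (out ++ [buf']) []            -- yield buf; buf = []
      else flushLoopA size rest out buf'

def flush_by_count (entries : List (List (String × String))) (size : Int) : List (List (List (String × String))) :=
  flushLoopA size entries [] []

-- ===== PORT B =====
-- `batch = list(islice(it, size)); if not batch: return; yield batch` : one chunk per loop step.
-- islice takes the head then size-1 more elements (the (n-1) phrasing keeps the recursion total).
def chunksB (n : Nat) : List (List (String × String)) → List (List (List (String × String)))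
  | [] => []
  | e :: rest => (e :: rest.take (n - 1)) :: chunksB n (rest.drop (n - 1))
  termination_by l => l.length
  decreasing_by simp

def flush_by_count_alt (entries : List (List (String × String))) (size : Int) : List (List (List (String × String))) :=
  chunksB size.toNat entries

-- ===== PRECONDITION & SPEC =====
-- Pre_ excludes exactly size < 1, where Python A (and B) raise ValueError.
def Pre_flush_by_count (entries : List (List (String × String))) (size : Int) : Prop := 1 ≤ size
instance (entries : List (List (String × String))) (size : Int) : Decidable (Pre_flush_by_count entries size) := by unfold Pre_flush_by_count; infer_instance
def pvWitness_flush_by_count : (List (List (String × String))) × Int := ([[("a", "1")], [("b", "2")], [("c", "3")]], 2)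

def Spec_flush_by_count (entries : List (List (String × String))) (size : Int) (out : List (List (List (String × String)))) : Prop := out = flush_by_count_alt entries size
instance (entries : List (List (String × String))) (size : Int) (out : List (List (List (String × String)))) : Decidable (Spec_flush_by_count entries size out) := by unfold Spec_flush_by_count; infer_instance

-- ===== CLAIM (what is proved, stated in full; the proofs are below) =====
def Claim_equal_flush_by_count : Prop := ∀ (entries : List (List (String × String))) (size : Int), Dom_flush_by_count entries size → Pre_flush_by_count entries size → Spec_flush_by_count entries size (flush_by_count entries size)

-- ===== LEMMAS AND PROOFS =====

-- equation lemmas for the well-founded recursion chunksB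
lemma chunksB_nil (n : Nat) : chunksB n [] = [] := by rw [chunksB.eq_def]

lemma chunksB_cons (n : Nat) (e : List (String × String)) (rest : List (List (String × String))) :
    chunksB n (e :: rest) = (e :: rest.take (n - 1)) :: chunksB n (rest.drop (n - 1)) := by
  rw [chunksB.eq_def]

-- A's loop, started at `out`/`buf` with buf strictly shorter than size, produces `out` followed by:
-- the batch completing `buf` and then B's chunks of the remainder (if buf = [], just B's chunks).
lemma flushLoopA_eq (size : Int) (hs : 1 ≤ size) :
    ∀ (k : Nat) (rest : List (List (String × String))), rest.length ≤ k →
    ∀ (out : List (List (List (String × String)))) (buf : List (List (String × String))),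
      buf.length < size.toNat →
      flushLoopA size rest out buf =
        out ++ (if buf = [] then chunksB size.toNat rest
                else (buf ++ rest.take (size.toNat - buf.length)) ::
                     chunksB size.toNat (rest.drop (size.toNat - buf.length))) := by
  intro k
  induction k with
  | zero =>
    intro rest hk out buf hb
    have : rest = [] := List.length_eq_zero_iff.mp (Nat.le_zero.mp hk)
    subst this
    by_cases h : buf = []
    · subst h; simp [flushLoopA, chunksB_nil]
    · simp [flushLoopA, chunksB_nil, h]
  | succ k ih =>
    intro rest hk out buf hb
    match rest with
    | [] =>
      by_cases h : buf = []
      · subst h; simp [flushLoopA, chunksB_nil]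
      · simp [flushLoopA, chunksB_nil, h]
    | e :: rest' =>
      have hk' : rest'.length ≤ k := by simpa using hk
      have hn1 : 1 ≤ size.toNat := by omega
      by_cases hfull : size ≤ ((buf ++ [e]).length : Int)
      · -- buffer becomes full: buf.length + 1 = size
        have hlen : buf.length + 1 = size.toNat := by
          simp at hfull; omega
        have h0 : (0 : Nat) < size.toNat := by omega
        rw [flushLoopA]
        simp only [hfull, if_pos]
        rw [ih rest' hk' (out ++ [buf ++ [e]]) [] h0]
        by_cases h : buf = []
        · subst h
          -- size = 1: chunksB 1 (e :: rest') = [e] :: chunksB 1 rest'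
          have h1 : size.toNat = 1 := by simp at hlen; omega
          rw [h1, chunksB_cons]
          simp
        · have hsub : size.toNat - buf.length = 1 := by omega
          rw [hsub, chunksB_cons]
          simp [h]
      · -- buffer not yet full
        have hlt : buf.length + 1 < size.toNat := by
          simp at hfull; omega
        rw [flushLoopA]
        simp only [hfull, if_neg, not_false_iff]
        rw [ih rest' hk' out (buf ++ [e]) (by simpa using hlt)]
        have hne : buf ++ [e] ≠ [] := by simp
        simp only [hne, if_neg, not_false_iff]
        by_cases h : buf = []
        · subst h
          -- starting a new chunk with e
          simp only [List.nil_append, if_pos]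
          rw [chunksB_cons]
          simp
        · simp only [h, if_neg, not_false_iff]
          have h1 : size.toNat - buf.length = (size.toNat - (buf ++ [e]).length) + 1 := by
            simp; omega
          rw [h1]
          simp [List.take_succ_cons, List.drop_succ_cons, List.append_assoc]

-- ===== VERDICT (by name: the statement is the Claim_ definition above) =====
theorem flush_by_count_spec : Claim_equal_flush_by_count := by
  intro entries size _ hpre
  have hs : 1 ≤ size := hpre
  unfold Spec_flush_by_count flush_by_count flush_by_count_alt
  have h0 : ([] : List (List (String × String))).length < size.toNat := by
    simp; omega
  rw [flushLoopA_eq size hs entries.length entries le_rfl [] [] h0]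
  simp
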